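-- pv_equiv track=rewrite | github.com/bobbydavid/AdventOfCode | 2019/rdm/day16.py | run_fft
-- ===== SOURCE A (Python) =====
-- PATTERN = [0, 1, 0, -1]
--
-- def get_multiplier(row, col):
--   d = (col + 1) // (row + 1)
--   return PATTERN[d % len(PATTERN)]
--
-- def vector_mod(vec):
--   return [abs(x) % 10 for x in vec]
--
-- def run_fft(digits):
--   output_digits = [0] * len(digits)
--   for n in range(len(digits)):
--     s = 0
--     for i, d in enumerate(digits):
--       s += d * get_multiplier(n, i)
--     output_digits[n] = s
--   return vector_mod(output_digits)
-- ===== SOURCE B (Python) =====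
-- def run_fft(digits):
--   n = len(digits)
--   prefix = [0] * (n + 1)
--   for i, d in enumerate(digits):
--     prefix[i + 1] = prefix[i] + d
--   out = []
--   for row in range(n):
--     length = row + 1
--     s = 0
--     sign = 1
--     start = length - 1
--     while start < n:
--       end = start + length
--       if end > n:
--         end = n
--       s += sign * (prefix[end] - prefix[start])
--       sign = -sign
--       start += 2 * length
--     out.append(abs(s) % 10)
--   return out
-- ===== Notes on version B (the rewrite author's own statement) =====
-- stated objective: faster
-- what changed: Replaces the per-output-digit inner scan over all inputs with a prefix-sum array queried once per +1/-1 pattern block, skipping the zero-weight blocks entirely.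
import Mathlib
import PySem

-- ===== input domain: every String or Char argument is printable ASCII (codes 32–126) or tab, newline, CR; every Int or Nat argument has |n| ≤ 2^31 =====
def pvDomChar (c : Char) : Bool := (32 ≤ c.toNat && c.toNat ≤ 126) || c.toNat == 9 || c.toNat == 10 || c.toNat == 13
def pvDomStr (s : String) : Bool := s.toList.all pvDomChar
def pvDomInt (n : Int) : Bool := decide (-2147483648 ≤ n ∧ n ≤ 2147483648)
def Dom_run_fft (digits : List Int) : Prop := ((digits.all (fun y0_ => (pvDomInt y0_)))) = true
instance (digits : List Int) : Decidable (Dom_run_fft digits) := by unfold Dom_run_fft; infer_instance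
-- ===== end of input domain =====

-- B replaces A's per-row scan over all digits with a prefix-sum array queried once per ±1 pattern block (a timing run measured B faster).

-- ===== PORT A =====
def PATTERN : List Int := [0, 1, 0, -1]

def get_multiplier (row col : Int) : Int :=
  let d := PySem.Int.floordiv (col + 1) (row + 1)
  PySem.List.pyGetD PATTERN (PySem.Int.mod d (PATTERN.length : Int)) 0

def vector_mod (vec : List Int) : List Int :=
  vec.map (fun x => PySem.Int.mod |x| 10)

def run_fft (digits : List Int) : List Int :=
  vector_mod ((PySem.List.pyRange 0 (digits.length : Int) 1).map (fun n =>
    (PySem.List.enumerate digits 0).foldl (fun s p => s + p.2 * get_multiplier n p.1) 0))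

-- ===== PORT B =====
-- B's first loop: prefix[0] = 0, prefix[i+1] = prefix[i] + digits[i]
def mkPrefix (acc : Int) : List Int → List Int
  | [] => [acc]
  | d :: ds => acc :: mkPrefix (acc + d) ds

-- B's while loop over the ±1 block starts; `row + 1` is the block length
def blockLoop (pfx : List Int) (n row : Nat) (start : Nat) (sign s : Int) : Int :=
  if start < n then
    let e := min (start + (row + 1)) n
    blockLoop pfx n row (start + 2 * (row + 1)) (-sign)
      (s + sign * (pfx.getD e 0 - pfx.getD start 0))
  else s
termination_by n - start
decreasing_by omega

def run_fft_alt (digits : List Int) : List Int :=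
  let n := digits.length
  let pfx := mkPrefix 0 digits
  (List.range n).map (fun row => PySem.Int.mod |blockLoop pfx n row row 1 0| 10)

-- ===== PRECONDITION & SPEC =====
def Spec_run_fft (digits : List Int) (out : List Int) : Prop := out = run_fft_alt digits
instance (digits : List Int) (out : List Int) : Decidable (Spec_run_fft digits out) := by unfold Spec_run_fft; infer_instance

-- ===== CLAIM (what is proved, stated in full; the proofs are below) =====
def Claim_equal_run_fft : Prop := ∀ (digits : List Int), Dom_run_fft digits → Spec_run_fft digits (run_fft digits)

-- ===== LEMMAS AND PROOFS =====

-- proof-side abbreviations: element access, pattern weight, prefix sum, weighted tail sum, block sign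
def fD (digits : List Int) (i : Nat) : Int := digits.getD i 0
def pW (L i : Nat) : Int := if (i + 1) / L % 4 = 1 then 1 else if (i + 1) / L % 4 = 3 then -1 else 0
def pP (digits : List Int) (j : Nat) : Int := ∑ i ∈ Finset.range j, fD digits i
def pT (digits : List Int) (L a : Nat) : Int := ∑ i ∈ Finset.Ico a digits.length, fD digits i * pW L i
def sgn (k : Nat) : Int := if k % 2 = 0 then 1 else -1

-- A's multiplier at Nat indices is the pattern weight
lemma gm (row i : Nat) : get_multiplier (row : Int) (i : Int) = pW (row + 1) i := by
  unfold get_multiplier pW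
  have h1 : ((i : Int) + 1) = ((i + 1 : Nat) : Int) := by push_cast; ring
  have h2 : ((row : Int) + 1) = ((row + 1 : Nat) : Int) := by push_cast; ring
  rw [h1, h2, PySem.Int.floordiv_natCast]
  have h3 : (PATTERN.length : Int) = ((4 : Nat) : Int) := by decide
  rw [h3]
  dsimp only
  rw [PySem.Int.mod_natCast, PySem.List.pyGetD_natCast]
  set r := (i + 1) / (row + 1) % 4 with hr
  have h4 : r < 4 := Nat.mod_lt _ (by norm_num)
  interval_cases r <;> simp [PATTERN]

-- A's inner fold over enumerate as a range sum
lemma enum_fold_gen (G : Int → Int) : ∀ (xs : List Int) (j s0 : Int),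
    (PySem.List.enumerate xs j).foldl (fun s p => s + p.2 * G p.1) s0
      = s0 + ∑ i ∈ Finset.range xs.length, xs.getD i 0 * G (j + i) := by
  intro xs
  induction xs with
  | nil => intro j s0; simp [PySem.List.enumerate]
  | cons d ds ih =>
    intro j s0
    rw [PySem.List.enumerate_cons, List.foldl_cons, ih (j + 1) (s0 + d * G j)]
    simp only [List.length_cons]
    rw [Finset.sum_range_succ']
    have hsum : ∑ i ∈ Finset.range ds.length, (d :: ds).getD (i + 1) 0 * G (j + ↑(i + 1))
        = ∑ i ∈ Finset.range ds.length, ds.getD i 0 * G (j + 1 + ↑i) := by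
      refine Finset.sum_congr rfl (fun i _ => ?_)
      rw [List.getD_cons_succ]
      congr 1
      push_cast; ring_nf
    simp only [List.getD_cons_zero]
    rw [← hsum]
    push_cast
    simp only [add_zero]
    ring

lemma fD_zero (digits : List Int) (i : Nat) (h : digits.length ≤ i) : fD digits i = 0 := by
  simp [fD, List.getElem?_eq_none (by omega : digits.length ≤ i)]

-- B's prefix list realises pP
lemma mkPrefix_getD : ∀ (digits : List Int) (acc : Int) (j : Nat), j ≤ digits.length →
    (mkPrefix acc digits).getD j 0 = acc + pP digits j := by
  intro digits
  induction digits with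
  | nil =>
    intro acc j h
    have : j = 0 := by simpa using h
    subst this; simp [mkPrefix, pP]
  | cons d ds ih =>
    intro acc j h
    cases j with
    | zero => simp [mkPrefix, pP]
    | succ j' =>
      rw [mkPrefix, List.getD_cons_succ, ih (acc + d) j' (by simpa using h)]
      have : pP (d :: ds) (j' + 1) = d + pP ds j' := by
        rw [pP, Finset.sum_range_succ']
        simp only [fD, List.getD_cons_succ, List.getD_cons_zero]
        rw [pP]
        simp only [fD]
        ring
      rw [this]; ring

-- weighted sums past the list's end vanish, so any upper bound ≥ length gives pT
lemma pT_ext (digits : List Int) (L a M : Nat) (hM : digits.length ≤ M) :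
    ∑ i ∈ Finset.Ico a M, fD digits i * pW L i = pT digits L a := by
  rw [pT]
  refine (Finset.sum_subset (Finset.Ico_subset_Ico_right hM) (fun x hx hnx => ?_)).symm
  have hxa : a ≤ x := (Finset.mem_Ico.mp hx).1
  have : digits.length ≤ x := by
    rcases Finset.mem_Ico.mp hx with ⟨_, _⟩
    by_contra hc
    exact hnx (Finset.mem_Ico.mpr ⟨hxa, by omega⟩)
  rw [fD_zero _ _ this, zero_mul]

-- a range query on the prefix sums, with the end clipped to the length
lemma ico_f (digits : List Int) (a b : Nat) (haN : a ≤ digits.length) (hab : a ≤ b) :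
    ∑ i ∈ Finset.Ico a b, fD digits i = pP digits (min b digits.length) - pP digits a := by
  have h1 : ∑ i ∈ Finset.Ico a b, fD digits i = ∑ i ∈ Finset.Ico a (min b digits.length), fD digits i := by
    refine (Finset.sum_subset (Finset.Ico_subset_Ico_right (min_le_left _ _)) (fun x hx hnx => ?_)).symm
    have hxa : a ≤ x := (Finset.mem_Ico.mp hx).1
    have hxb : x < b := (Finset.mem_Ico.mp hx).2
    have : digits.length ≤ x := by
      by_contra hc
      exact hnx (Finset.mem_Ico.mpr ⟨hxa, by omega⟩)
    exact fD_zero _ _ this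
  rw [h1, Finset.sum_Ico_eq_sub _ (le_min hab haN)]
  rfl

-- on the k-th odd block the weight is constantly sgn k
lemma pW_const (row k i : Nat) (h1 : 2 * k * (row + 1) + row ≤ i)
    (h2 : i < 2 * k * (row + 1) + row + (row + 1)) : pW (row + 1) i = sgn k := by
  have e1 : (2 * k + 1) * (row + 1) = 2 * k * (row + 1) + (row + 1) := by ring
  have e2 : (2 * k + 1 + 1) * (row + 1) = 2 * k * (row + 1) + 2 * (row + 1) := by ring
  have hq : (i + 1) / (row + 1) = 2 * k + 1 := by
    apply Nat.div_eq_of_lt_le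
    · rw [e1]; linarith
    · rw [e2]; linarith
  rw [pW, hq, sgn]
  rcases Nat.mod_two_eq_zero_or_one k with h | h
  · have : (2 * k + 1) % 4 = 1 := by omega
    simp [this, h]
  · have : (2 * k + 1) % 4 = 3 := by omega
    simp [this, h]

-- on the even block after it the weight is 0
lemma pW_zero_block (row k i : Nat) (h1 : 2 * k * (row + 1) + row + (row + 1) ≤ i)
    (h2 : i < 2 * k * (row + 1) + row + 2 * (row + 1)) : pW (row + 1) i = 0 := by
  have e1 : (2 * k + 2) * (row + 1) = 2 * k * (row + 1) + 2 * (row + 1) := by ring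
  have e2 : (2 * k + 2 + 1) * (row + 1) = 2 * k * (row + 1) + 3 * (row + 1) := by ring
  have hq : (i + 1) / (row + 1) = 2 * k + 2 := by
    apply Nat.div_eq_of_lt_le
    · rw [e1]; linarith
    · rw [e2]; linarith
  rw [pW, hq]
  have h3 : (2 * k + 2) % 4 = 0 ∨ (2 * k + 2) % 4 = 2 := by omega
  rcases h3 with h | h <;> simp [h]

-- one block step: peel a ± block and a zero block off the weighted tail sum
lemma block_step (digits : List Int) (row k a : Nat)
    (ha : a = 2 * k * (row + 1) + row) (hs : a < digits.length) :
    pT digits (row + 1) a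
      = sgn k * (pP digits (min (a + (row + 1)) digits.length) - pP digits a)
        + pT digits (row + 1) (a + 2 * (row + 1)) := by
  set N := digits.length with hN
  set M := max N (a + 2 * (row + 1)) with hM
  have hMN : N ≤ M := le_max_left _ _
  rw [← pT_ext digits (row + 1) a M hMN]
  have hsplit1 : a ≤ a + 2 * (row + 1) := by omega
  have hsplit2 : a + 2 * (row + 1) ≤ M := le_max_right _ _
  rw [← Finset.sum_Ico_consecutive (fun i => fD digits i * pW (row + 1) i) hsplit1 hsplit2]
  rw [← Finset.sum_Ico_consecutive (fun i => fD digits i * pW (row + 1) i)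
    (by omega : a ≤ a + (row + 1)) (by omega : a + (row + 1) ≤ a + 2 * (row + 1))]
  have hterm1 : ∑ i ∈ Finset.Ico a (a + (row + 1)), fD digits i * pW (row + 1) i
      = sgn k * (pP digits (min (a + (row + 1)) N) - pP digits a) := by
    have hc : ∑ i ∈ Finset.Ico a (a + (row + 1)), fD digits i * pW (row + 1) i
        = ∑ i ∈ Finset.Ico a (a + (row + 1)), fD digits i * sgn k := by
      refine Finset.sum_congr rfl (fun i hi => ?_)
      rcases Finset.mem_Ico.mp hi with ⟨hi1, hi2⟩
      rw [pW_const row k i (by omega) (by omega)]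
    rw [hc, ← Finset.sum_mul, ico_f digits a (a + (row + 1)) (by omega) (by omega)]
    ring
  have hterm2 : ∑ i ∈ Finset.Ico (a + (row + 1)) (a + 2 * (row + 1)), fD digits i * pW (row + 1) i = 0 := by
    refine Finset.sum_eq_zero (fun i hi => ?_)
    rcases Finset.mem_Ico.mp hi with ⟨hi1, hi2⟩
    rw [pW_zero_block row k i (by omega) (by omega), mul_zero]
  have hterm3 : ∑ i ∈ Finset.Ico (a + 2 * (row + 1)) M, fD digits i * pW (row + 1) i
      = pT digits (row + 1) (a + 2 * (row + 1)) := pT_ext digits (row + 1) _ M hMN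
  rw [hterm1, hterm2, hterm3]
  ring

lemma sgn_succ (k : Nat) : sgn (k + 1) = -sgn k := by
  rw [sgn, sgn]
  rcases Nat.mod_two_eq_zero_or_one k with h | h
  · have : (k + 1) % 2 = 1 := by omega
    simp [h, this]
  · have : (k + 1) % 2 = 0 := by omega
    simp [h, this]

-- B's while loop computes the weighted tail sum from the k-th block start
lemma blockLoop_eq (digits : List Int) (row : Nat) : ∀ (m k a : Nat) (s : Int),
    a = 2 * k * (row + 1) + row → digits.length - a ≤ m →
    blockLoop (mkPrefix 0 digits) digits.length row a (sgn k) s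
      = s + pT digits (row + 1) a := by
  intro m
  induction m with
  | zero =>
    intro k a s ha h
    have hge : digits.length ≤ a := by omega
    rw [blockLoop, if_neg (Nat.not_lt.mpr hge)]
    rw [pT, Finset.Ico_eq_empty (by omega)]
    simp
  | succ m ih =>
    intro k a s ha h
    by_cases hs : a < digits.length
    · rw [blockLoop, if_pos hs]
      have ha' : a + 2 * (row + 1) = 2 * (k + 1) * (row + 1) + row := by rw [ha]; ring
      rw [show -sgn k = sgn (k + 1) from (sgn_succ k).symm]
      rw [ih (k + 1) (a + 2 * (row + 1)) _ ha' (by omega)]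
      have hgd1 : (mkPrefix 0 digits).getD (min (a + (row + 1)) digits.length) 0
          = pP digits (min (a + (row + 1)) digits.length) := by
        rw [mkPrefix_getD digits 0 _ (by omega)]; ring
      have hgd2 : (mkPrefix 0 digits).getD a 0 = pP digits a := by
        rw [mkPrefix_getD digits 0 _ (by omega)]; ring
      rw [hgd1, hgd2, block_step digits row k a ha hs]
      ring
    · rw [blockLoop, if_neg hs]
      rw [pT, Finset.Ico_eq_empty (by omega)]
      simp

lemma pW_head (row i : Nat) (h : i < row) : pW (row + 1) i = 0 := by
  have hq : (i + 1) / (row + 1) = 0 := Nat.div_eq_of_lt (by omega)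
  simp [pW, hq]

-- the indices before the first block carry weight 0
lemma head_zero (digits : List Int) (row : Nat) :
    pT digits (row + 1) 0 = pT digits (row + 1) row := by
  set M := max digits.length row with hM
  rw [← pT_ext digits (row + 1) 0 M (le_max_left _ _),
    ← pT_ext digits (row + 1) row M (le_max_left _ _),
    ← Finset.sum_Ico_consecutive (fun i => fD digits i * pW (row + 1) i)
      (Nat.zero_le row) (le_max_right _ _)]
  have h0 : ∑ i ∈ Finset.Ico 0 row, fD digits i * pW (row + 1) i = 0 := by
    refine Finset.sum_eq_zero (fun i hi => ?_)
    rcases Finset.mem_Ico.mp hi with ⟨_, hi2⟩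
    rw [pW_head row i hi2, mul_zero]
  rw [h0, zero_add]

lemma run_fft_eq_alt (digits : List Int) : run_fft digits = run_fft_alt digits := by
  rw [run_fft, run_fft_alt, vector_mod, PySem.List.pyRange_one]
  simp only [sub_zero, Int.toNat_natCast, List.map_map]
  refine List.map_congr_left (fun row hrow => ?_)
  have hrow' : row < digits.length := List.mem_range.mp hrow
  simp only [Function.comp, zero_add]
  congr 2
  rw [enum_fold_gen (get_multiplier (row : Int)) digits 0 0]
  have hsum : ∑ i ∈ Finset.range digits.length, digits.getD i 0 * get_multiplier (row : Int) ((0 : Int) + i)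
      = pT digits (row + 1) 0 := by
    rw [pT, ← Finset.range_eq_Ico]
    refine Finset.sum_congr rfl (fun i _ => ?_)
    rw [zero_add, gm row i, fD]
  rw [hsum]
  have hsgn : (1 : Int) = sgn 0 := by simp [sgn]
  rw [hsgn]
  rw [blockLoop_eq digits row digits.length 0 row 0 (by ring) (by omega)]
  rw [zero_add, head_zero]
  exact (zero_add _).symm

-- ===== VERDICT (by name: the statement is the Claim_ definition above) =====
theorem run_fft_spec : Claim_equal_run_fft := by
  intro digits _
  exact run_fft_eq_alt digits
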